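-- pv_equiv track=rewrite | github.com/chango112595-cell/Aurora-x | analyze_branch_features.py | estimate_status
-- ===== SOURCE A (Python) =====
-- def estimate_status(files):
--     """Estimate if branch is working"""
--     issues = []
--
--     python_files = sum(1 for f in files if f.endswith('.py'))
--     js_files = sum(1 for f in files if f.endswith('.js') or f.endswith('.jsx') or f.endswith('.tsx'))
--
--     # Check for critical bloat
--     venv_cache = sum(1 for f in files if '.venv' in f or '__pycache__' in f or 'node_modules' in f)
--     if venv_cache > 500:
--         issues.append('Bloated with venv/cache files')
--
--     if any('backup' in f.lower() for f in files):
--         backup_count = sum(1 for f in files if 'backup' in f.lower())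
--         if backup_count > 50:
--             issues.append('Many backup files')
--
--     # Assess working status
--     has_config = any(f in files for f in ['package.json', 'pyproject.toml', 'requirements.txt', 'Gemfile'])
--     has_source = python_files > 10 or js_files > 10
--
--     status = 'Working' if (has_config or has_source) and len(issues) == 0 else 'Issues'
--     return status, issues
-- ===== SOURCE B (Python) =====
-- def estimate_status(files):
--     """Estimate if branch is working (single pass over files; same thresholds and append order)."""
--     CONFIG = {'package.json', 'pyproject.toml', 'requirements.txt', 'Gemfile'}
--     python_files = js_files = venv_cache = backup_count = 0
--     has_config = False
--     for f in files:
--         if f.endswith('.py'):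
--             python_files += 1
--         if f.endswith('.js') or f.endswith('.jsx') or f.endswith('.tsx'):
--             js_files += 1
--         if '.venv' in f or '__pycache__' in f or 'node_modules' in f:
--             venv_cache += 1
--         if 'backup' in f.lower():
--             backup_count += 1
--         if f in CONFIG:
--             has_config = True
--     issues = []
--     if venv_cache > 500:
--         issues.append('Bloated with venv/cache files')
--     if backup_count > 50:
--         issues.append('Many backup files')
--     has_source = python_files > 10 or js_files > 10
--     status = 'Working' if (has_config or has_source) and not issues else 'Issues'
--     return status, issues
-- ===== Notes on version B (the rewrite author's own statement) =====
-- stated objective: simpler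
-- what changed: Fuses A's six separate scans of the file list (four 0/1-sum comprehensions plus two any() scans) into one loop maintaining four counters and a has_config flag, then applies the same thresholds in the same order; the redundant any('backup' ...) guard is dropped since backup_count > 50 implies it.
import Mathlib
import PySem

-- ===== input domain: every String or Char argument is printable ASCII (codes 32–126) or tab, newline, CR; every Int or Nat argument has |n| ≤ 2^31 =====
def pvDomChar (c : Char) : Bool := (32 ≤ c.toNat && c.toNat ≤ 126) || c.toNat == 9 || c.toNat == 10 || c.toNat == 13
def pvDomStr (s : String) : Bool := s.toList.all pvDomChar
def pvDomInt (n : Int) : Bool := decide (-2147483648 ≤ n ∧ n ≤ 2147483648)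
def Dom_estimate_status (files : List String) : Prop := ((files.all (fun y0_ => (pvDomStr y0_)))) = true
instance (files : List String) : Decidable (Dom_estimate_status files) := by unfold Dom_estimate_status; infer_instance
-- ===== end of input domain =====

-- B fuses A's six separate scans into one loop with four counters and a config flag; same thresholds, same order.


-- shared predicates (the Python tests both programs apply to a file)
def pvIsPy (f : String) : Bool := PySem.Str.endswith f ".py"
def pvIsJs (f : String) : Bool :=
  PySem.Str.endswith f ".js" || PySem.Str.endswith f ".jsx" || PySem.Str.endswith f ".tsx"
def pvIsVenv (f : String) : Bool :=
  PySem.Str.isIn ".venv" f || PySem.Str.isIn "__pycache__" f || PySem.Str.isIn "node_modules" f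
def pvIsBackup (f : String) : Bool := PySem.Str.isIn "backup" (PySem.Str.lower f)
def pvIsConfig (f : String) : Bool :=
  f == "package.json" || f == "pyproject.toml" || f == "requirements.txt" || f == "Gemfile"

-- ===== PORT A =====
def estimate_status (files : List String) : String × List String :=
  let issues : List String := []
  let python_files : Int := (files.map (fun f => if pvIsPy f then (1 : Int) else 0)).sum
  let js_files : Int := (files.map (fun f => if pvIsJs f then (1 : Int) else 0)).sum
  let venv_cache : Int := (files.map (fun f => if pvIsVenv f then (1 : Int) else 0)).sum
  let issues := if venv_cache > 500 then issues ++ ["Bloated with venv/cache files"] else issues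
  let issues :=
    if files.any (fun f => pvIsBackup f) then
      let backup_count : Int := (files.map (fun f => if pvIsBackup f then (1 : Int) else 0)).sum
      if backup_count > 50 then issues ++ ["Many backup files"] else issues
    else issues
  let has_config :=
    (["package.json", "pyproject.toml", "requirements.txt", "Gemfile"]).any (fun f => files.contains f)
  let has_source := python_files > 10 || js_files > 10
  let status := if (has_config || has_source) && issues.length == 0 then "Working" else "Issues"
  (status, issues)

-- ===== PORT B =====
def pvStep (st : Int × Int × Int × Int × Bool) (f : String) : Int × Int × Int × Int × Bool :=
  ⟨st.1 + (if pvIsPy f then 1 else 0),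
   st.2.1 + (if pvIsJs f then 1 else 0),
   st.2.2.1 + (if pvIsVenv f then 1 else 0),
   st.2.2.2.1 + (if pvIsBackup f then 1 else 0),
   st.2.2.2.2 || pvIsConfig f⟩

def estimate_status_alt (files : List String) : String × List String :=
  let st := files.foldl pvStep (0, 0, 0, 0, false)
  let issues :=
    (if st.2.2.1 > 500 then ["Bloated with venv/cache files"] else []) ++
    (if st.2.2.2.1 > 50 then ["Many backup files"] else [])
  let status := if (st.2.2.2.2 || st.1 > 10 || st.2.1 > 10) && issues.isEmpty then "Working" else "Issues"
  (status, issues)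

-- ===== PRECONDITION & SPEC =====
def Spec_estimate_status (files : List String) (out : String × List String) : Prop := out = estimate_status_alt files
instance (files : List String) (out : String × List String) : Decidable (Spec_estimate_status files out) := by unfold Spec_estimate_status; infer_instance

-- ===== CLAIM (what is proved, stated in full; the proofs are below) =====
def Claim_equal_estimate_status : Prop := ∀ (files : List String), Dom_estimate_status files → Spec_estimate_status files (estimate_status files)

-- ===== LEMMAS AND PROOFS =====

lemma pvFold_char (files : List String) (a b c d : Int) (e : Bool) :
    files.foldl pvStep (a, b, c, d, e) =
      (a + (files.map (fun f => if pvIsPy f then (1 : Int) else 0)).sum,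
       b + (files.map (fun f => if pvIsJs f then (1 : Int) else 0)).sum,
       c + (files.map (fun f => if pvIsVenv f then (1 : Int) else 0)).sum,
       d + (files.map (fun f => if pvIsBackup f then (1 : Int) else 0)).sum,
       e || files.any pvIsConfig) := by
  induction files generalizing a b c d e with
  | nil => simp
  | cons f fs ih =>
      simp only [List.foldl_cons, List.map_cons, List.sum_cons, List.any_cons, pvStep, ih]
      refine Prod.ext (by ring) (Prod.ext (by ring) (Prod.ext (by ring) (Prod.ext (by ring) ?_)))
      simp [Bool.or_assoc]

lemma pvNoBackup_sum_zero (files : List String)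
    (h : files.any (fun f => pvIsBackup f) = false) :
    (files.map (fun f => if pvIsBackup f then (1 : Int) else 0)).sum = 0 := by
  induction files with
  | nil => simp
  | cons f fs ih =>
      simp only [List.any_cons, Bool.or_eq_false_iff] at h
      simp [h.1, ih h.2]

lemma pvConfig_any (files : List String) :
    (["package.json", "pyproject.toml", "requirements.txt", "Gemfile"]).any
        (fun f => files.contains f) = files.any pvIsConfig := by
  rw [Bool.eq_iff_iff]
  simp only [List.any_eq_true, List.mem_cons, List.not_mem_nil, or_false, pvIsConfig,
    Bool.or_eq_true, beq_iff_eq, List.contains_eq_mem, decide_eq_true_eq]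
  constructor
  · rintro ⟨f, (rfl | rfl | rfl | rfl), hm⟩ <;> exact ⟨_, hm, by simp⟩
  · rintro ⟨x, hx, (((rfl | rfl) | rfl) | rfl)⟩ <;> exact ⟨_, by simp, hx⟩

-- ===== VERDICT (by name: the statement is the Claim_ definition above) =====
theorem estimate_status_spec : Claim_equal_estimate_status := by
  intro files _
  show estimate_status files = estimate_status_alt files
  unfold estimate_status estimate_status_alt
  rw [pvFold_char]
  simp only [zero_add, Bool.false_or, ← pvConfig_any]
  by_cases hb : files.any (fun f => pvIsBackup f) = true
  · simp only [hb, if_true]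
    by_cases hv : (files.map (fun f => if pvIsVenv f then (1 : Int) else 0)).sum > 500 <;>
      by_cases hk : (files.map (fun f => if pvIsBackup f then (1 : Int) else 0)).sum > 50 <;>
      simp [hv, hk, or_assoc]
  · have hb' : files.any (fun f => pvIsBackup f) = false := by
      cases h : files.any (fun f => pvIsBackup f) <;> simp_all
    have hz := pvNoBackup_sum_zero files hb'
    simp only [hb', Bool.false_eq_true, if_false, hz]
    by_cases hv : (files.map (fun f => if pvIsVenv f then (1 : Int) else 0)).sum > 500 <;>
      simp [hv, or_assoc]
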